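-- pv_equiv track=rewrite | github.com/hugocondesa-debug/sonar-engine | src/sonar/pipelines/daily_monetary_indices.py | _classify_m2_compute_mode
-- ===== SOURCE A (Python) =====
-- def _classify_m2_compute_mode(flags: tuple[str, ...]) -> str:
--     """Return ``"FULL"`` / ``"PARTIAL"`` / ``"LEGACY"`` per Sprint F flag contract.
--
--     - ``FULL``: any flag ending ``_M2_FULL_COMPUTE_LIVE`` (Sprint F
--       Commits 4-5 builders that wire all four Taylor components).
--     - ``PARTIAL``: any flag ending ``_M2_PARTIAL_COMPUTE`` (Sprint F
--       builders with forecast missing — Taylor-forward variant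
--       skipped but base 1993 / 1999 variants still compute).
--     - ``LEGACY``: none of the Sprint F flags present (US canonical
--       CBO path or any builder that predates Sprint F). Operators
--       read this as "no Sprint F observability on this builder".
--     """
--     for flag in flags:
--         if flag.endswith("_M2_FULL_COMPUTE_LIVE"):
--             return "FULL"
--     for flag in flags:
--         if flag.endswith("_M2_PARTIAL_COMPUTE"):
--             return "PARTIAL"
--     return "LEGACY"
-- ===== SOURCE B (Python) =====
-- def _classify_m2_compute_mode(flags):
--     """Single pass: FULL returns immediately; PARTIAL remembered until the end."""
--     partial_seen = False
--     for flag in flags: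
--         if flag.endswith("_M2_FULL_COMPUTE_LIVE"):
--             return "FULL"
--         if flag.endswith("_M2_PARTIAL_COMPUTE"):
--             partial_seen = True
--     return "PARTIAL" if partial_seen else "LEGACY"
-- ===== Notes on version B (the rewrite author's own statement) =====
-- stated objective: simpler
-- what changed: Replaces A's two separate scans with one pass that early-returns on a FULL suffix and carries a partial_seen boolean to decide PARTIAL vs LEGACY at the end.
import Mathlib
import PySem

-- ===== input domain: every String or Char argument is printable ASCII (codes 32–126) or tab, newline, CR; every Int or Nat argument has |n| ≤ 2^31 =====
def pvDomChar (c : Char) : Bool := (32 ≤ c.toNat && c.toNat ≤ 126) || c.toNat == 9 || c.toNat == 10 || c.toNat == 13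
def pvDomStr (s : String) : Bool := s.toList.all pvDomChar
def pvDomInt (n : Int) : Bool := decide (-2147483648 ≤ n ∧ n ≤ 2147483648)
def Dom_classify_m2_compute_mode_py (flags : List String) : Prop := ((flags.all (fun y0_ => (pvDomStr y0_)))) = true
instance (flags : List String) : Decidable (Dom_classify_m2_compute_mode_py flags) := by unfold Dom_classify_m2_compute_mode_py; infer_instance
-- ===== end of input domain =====

-- B folds A's two scans into one pass with an early FULL return and a partial_seen flag (objective: simpler).
-- ===== PORT A =====
-- first loop: return "FULL" on the first flag ending "_M2_FULL_COMPUTE_LIVE"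
def pvLoopFull (flags : List String) : Option String :=
  match flags with
  | [] => none
  | f :: rest => if PySem.Str.endswith f "_M2_FULL_COMPUTE_LIVE" then some "FULL" else pvLoopFull rest

-- second loop: return "PARTIAL" on the first flag ending "_M2_PARTIAL_COMPUTE"
def pvLoopPartial (flags : List String) : Option String :=
  match flags with
  | [] => none
  | f :: rest => if PySem.Str.endswith f "_M2_PARTIAL_COMPUTE" then some "PARTIAL" else pvLoopPartial rest

def classify_m2_compute_mode_py (flags : List String) : String :=
  match pvLoopFull flags with
  | some r => r
  | none =>
    match pvLoopPartial flags with
    | some r => r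
    | none => "LEGACY"

-- ===== PORT B =====
-- B: single pass carrying partial_seen
def pvScan (flags : List String) (partialSeen : Bool) : String :=
  match flags with
  | [] => if partialSeen then "PARTIAL" else "LEGACY"
  | f :: rest =>
    if PySem.Str.endswith f "_M2_FULL_COMPUTE_LIVE" then "FULL"
    else if PySem.Str.endswith f "_M2_PARTIAL_COMPUTE" then pvScan rest true
    else pvScan rest partialSeen

def classify_m2_compute_mode_py_alt (flags : List String) : String :=
  pvScan flags false

-- ===== PRECONDITION & SPEC =====
def Spec_classify_m2_compute_mode_py (flags : List String) (out : String) : Prop := out = classify_m2_compute_mode_py_alt flags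
instance (flags : List String) (out : String) : Decidable (Spec_classify_m2_compute_mode_py flags out) := by unfold Spec_classify_m2_compute_mode_py; infer_instance

-- ===== CLAIM (what is proved, stated in full; the proofs are below) =====
def Claim_equal_classify_m2_compute_mode_py : Prop := ∀ (flags : List String), Dom_classify_m2_compute_mode_py flags → Spec_classify_m2_compute_mode_py flags (classify_m2_compute_mode_py flags)

-- ===== LEMMAS AND PROOFS =====

-- ===== VERDICT (by name: the statement is the Claim_ definition above) =====
theorem pvLoopPartial_val (flags : List String) : ∀ r, pvLoopPartial flags = some r → r = "PARTIAL" := by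
  induction flags with
  | nil => intro r h; simp [pvLoopPartial] at h
  | cons f rest ih =>
    intro r h
    simp only [pvLoopPartial] at h
    split at h
    · exact (Option.some_inj.mp h).symm
    · exact ih r h

theorem pv_scan_eq (flags : List String) (b : Bool) :
    pvScan flags b =
      (match pvLoopFull flags with
       | some r => r
       | none =>
         match pvLoopPartial flags with
         | some r => r
         | none => if b then "PARTIAL" else "LEGACY") := by
  induction flags generalizing b with
  | nil => simp [pvScan, pvLoopFull, pvLoopPartial]
  | cons f rest ih =>
    simp only [pvScan, pvLoopFull, pvLoopPartial]
    by_cases hf : PySem.Str.endswith f "_M2_FULL_COMPUTE_LIVE"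
    · simp at hf
      simp [hf]
    · by_cases hp : PySem.Str.endswith f "_M2_PARTIAL_COMPUTE"
      · simp at hf hp
        simp [hf, hp, ih]
        cases pvLoopFull rest <;> simp
        cases hq : pvLoopPartial rest with
        | none => simp
        | some r => simp [pvLoopPartial_val rest r hq]
      · simp at hf hp
        simp [hf, hp, ih]

theorem classify_m2_compute_mode_py_spec : Claim_equal_classify_m2_compute_mode_py := by
  intro flags _
  unfold Spec_classify_m2_compute_mode_py classify_m2_compute_mode_py classify_m2_compute_mode_py_alt
  rw [pv_scan_eq]
  cases pvLoopFull flags <;> cases hq : pvLoopPartial flags <;> simp
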